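-- pv_equiv track=rewrite | github.com/sandialabs/cross-sim | simulator/backend/converters/builtin/subcore_parameters_converter.py | _multi_index_split
-- ===== SOURCE A (Python) =====
-- def _multi_index_split(text: str, idxs: list[int]) -> list[str]:
--     """Splits a string at multiple indexes.
--
--     Args:
--         text: Text to be split.
--         idxs: Indexes to split the text at.
--
--     Returns:
--         list[str]: List of each substring resulting from the split.
--     """
--     result = []
--     last_pos = 0
--     for pos in idxs:
--         result.append(text[last_pos:pos])
--         last_pos = pos + 1
--     result.append(text[last_pos:])
--     return result
-- ===== SOURCE B (Python) =====
-- def _multi_index_split(text: str, idxs: list[int]) -> list[str]: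
--     """Splits a string at multiple indexes, built back-to-front.
--
--     Walk the indices in REVERSE, keeping the end boundary of the next
--     piece (instead of a start cursor), emit pieces last-to-first, then
--     reverse the list once at the end.
--     """
--     out = []
--     nxt = len(text)
--     for pos in reversed(idxs):
--         out.append(text[pos + 1:nxt])
--         nxt = pos
--     out.append(text[:nxt])
--     out.reverse()
--     return out
-- ===== Notes on version B (the rewrite author's own statement) =====
-- stated objective: alternative
-- what changed: Builds the result back-to-front: iterates the indices in reverse maintaining the NEXT end boundary instead of a running start cursor, emits pieces last-to-first, and reverses the output once at the end.
import Mathlib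
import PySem

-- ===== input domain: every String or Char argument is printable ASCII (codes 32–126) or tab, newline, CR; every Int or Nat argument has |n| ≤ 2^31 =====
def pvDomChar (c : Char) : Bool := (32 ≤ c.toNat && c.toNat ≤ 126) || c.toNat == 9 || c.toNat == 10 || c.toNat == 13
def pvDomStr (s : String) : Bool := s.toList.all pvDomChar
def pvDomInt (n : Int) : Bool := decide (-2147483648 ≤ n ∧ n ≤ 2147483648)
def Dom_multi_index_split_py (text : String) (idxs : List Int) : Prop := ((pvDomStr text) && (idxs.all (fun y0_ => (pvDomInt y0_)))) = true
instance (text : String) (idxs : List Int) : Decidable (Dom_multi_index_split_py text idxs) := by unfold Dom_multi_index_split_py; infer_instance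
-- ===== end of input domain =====

-- B builds the split back-to-front: it walks idxs in reverse keeping the NEXT end boundary
-- instead of A's running start cursor, then reverses once (objective: alternative, same cost).


-- ===== PORT A =====
-- A's forward loop over idxs threading the running start cursor last_pos, then the tail slice.
def multiIndexSplitLoop (text : String) : List Int → Int → List String
  | [], last_pos => [PySem.Str.slice text (some last_pos) none]
  | pos :: rest, last_pos =>
      PySem.Str.slice text (some last_pos) (some pos) :: multiIndexSplitLoop text rest (pos + 1)

def multi_index_split_py (text : String) (idxs : List Int) : List String :=
  multiIndexSplitLoop text idxs 0

-- ===== PORT B =====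
-- B's reverse loop: nxt is the end boundary of the next piece; pieces are appended
-- last-to-first (Python out.append = acc ++ [·]); the base case is the trailing
-- out.append(text[:nxt]); the caller reverses the accumulated list once.
def multiIndexSplitRevLoop (text : String) : List Int → Int → List String → List String
  | [], nxt, out => out ++ [PySem.Str.slice text none (some nxt)]
  | pos :: rest, nxt, out =>
      multiIndexSplitRevLoop text rest pos (out ++ [PySem.Str.slice text (some (pos + 1)) (some nxt)])

def multi_index_split_py_alt (text : String) (idxs : List Int) : List String :=
  (multiIndexSplitRevLoop text idxs.reverse (PySem.Str.len text) []).reverse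

-- ===== PRECONDITION & SPEC =====
def Spec_multi_index_split_py (text : String) (idxs : List Int) (out : List String) : Prop := out = multi_index_split_py_alt text idxs
instance (text : String) (idxs : List Int) (out : List String) : Decidable (Spec_multi_index_split_py text idxs out) := by unfold Spec_multi_index_split_py; infer_instance

-- ===== CLAIM (what is proved, stated in full; the proofs are below) =====
def Claim_equal_multi_index_split_py : Prop := ∀ (text : String) (idxs : List Int), Dom_multi_index_split_py text idxs → Spec_multi_index_split_py text idxs (multi_index_split_py text idxs)

-- ===== LEMMAS AND PROOFS =====
-- Generic segment list: pieces of splitting with start boundary lp and final end boundary nxt.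
def segPieces (text : String) : List Int → Int → Int → List String
  | [], lp, nxt => [PySem.Str.slice text (some lp) (some nxt)]
  | pos :: rest, lp, nxt =>
      PySem.Str.slice text (some lp) (some pos) :: segPieces text rest (pos + 1) nxt

-- Slicing up to exactly len(text) is the same as slicing to the end.
theorem slice_to_len (text : String) (a : Int) :
    PySem.Str.slice text (some a) (some ((text.length : Int))) = PySem.Str.slice text (some a) none := by
  apply String.toList_injective
  simp [PySem.Str.toList_slice]
  simp [PySem.List.slice, PySem.List.clampIdx]
  split_ifs <;> omega

-- An omitted start boundary is start 0.
theorem slice_none_start (text : String) (b : Int) :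
    PySem.Str.slice text none (some b) = PySem.Str.slice text (some 0) (some b) := by
  apply String.toList_injective
  simp [PySem.Str.toList_slice]

-- A's loop is segPieces with final boundary len(text).
theorem loopA_eq_seg (text : String) (idxs : List Int) (lp : Int) :
    multiIndexSplitLoop text idxs lp = segPieces text idxs lp ((text.length : Int)) := by
  induction idxs generalizing lp with
  | nil => simp [multiIndexSplitLoop, segPieces, slice_to_len]
  | cons pos rest ih => simp [multiIndexSplitLoop, segPieces, ih]

-- Appending one split index extends the segment list at the back.
theorem segPieces_append (text : String) (ys : List Int) (pos lp nxt : Int) :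
    segPieces text (ys ++ [pos]) lp nxt
      = segPieces text ys lp pos ++ [PySem.Str.slice text (some (pos + 1)) (some nxt)] := by
  induction ys generalizing lp with
  | nil => simp [segPieces]
  | cons y rest ih => simp [segPieces, ih]

-- B's reverse loop accumulates exactly the reversed segment list of the reversed indices.
theorem loopB_eq_seg (text : String) (l : List Int) (nxt : Int) (out : List String) :
    multiIndexSplitRevLoop text l nxt out = out ++ (segPieces text l.reverse 0 nxt).reverse := by
  induction l generalizing nxt out with
  | nil => simp [multiIndexSplitRevLoop, segPieces, slice_none_start]
  | cons pos rest ih =>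
      simp [multiIndexSplitRevLoop, ih, segPieces_append]

-- ===== VERDICT (by name: the statement is the Claim_ definition above) =====
theorem multi_index_split_py_spec : Claim_equal_multi_index_split_py := by
  intro text idxs _
  unfold Spec_multi_index_split_py multi_index_split_py multi_index_split_py_alt
  rw [loopB_eq_seg, loopA_eq_seg]
  simp [PySem.Str.len]
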